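-- pv_equiv track=rewrite | github.com/things-0/denison_2026 | oli/ppxf_scott_code.py | assign_gas_components
-- ===== SOURCE A (Python) =====
-- def assign_gas_components(gas_names):
--     """
--     Assign component numbers to emission lines following the original grouping scheme.
--
--     Grouping rules:
--     - Component 1: All narrow Balmer lines (H10, H9, H8, Heps, Hdelta, Hgamma, Hbeta, Halpha)
--     - Component 2: [OII] doublet ([OII]3726, [OII]3729)
--     - Component 3: [SII] doublet ([SII]6716, [SII]6731)
--     - Component 4: [NeIII] doublet ([NeIII]3968, [NeIII]3869)
--     - Component 5: HeII4687
--     - Component 6: HeI5876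
--     - Component 7: [OIII]5007_d
--     - Component 8: [OI]6300_d
--     - Component 9: [NII]6583_d
--
--     Returns:
--         component_list: List of component numbers (one per gas line)
--         max_component: Highest component number used
--     """
--
--     # Define groupings
--     narrow_balmer = ['H10', 'H9', 'H8', 'Heps', 'Hdelta', 'Hgamma', 'Hbeta', 'Halpha']
--     oii_doublet = ['[OII]3726', '[OII]3729']
--     sii_doublet = ['[SII]6716', '[SII]6731']
--     neiii_doublet = ['[NeIII]3968', '[NeIII]3869']
--
--     # Map individual lines to components
--     other_lines = [
--         'HeII4687',
--         'HeI5876',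
--         '[OIII]5007_d',
--         '[OI]6300_d',
--         '[NII]6583_d'
--     ]
--
--     component_list = []
--
--     groups_line_nums = {}
--     for line in gas_names:
--         if line in narrow_balmer:
--             groups_line_nums.setdefault("narrow_balmer", len(groups_line_nums)+1)
--             component_list.append(groups_line_nums["narrow_balmer"])
--         elif line in oii_doublet:
--             groups_line_nums.setdefault("oii_doublet", len(groups_line_nums)+1)
--             component_list.append(groups_line_nums["oii_doublet"])
--         elif line in sii_doublet:
--             groups_line_nums.setdefault("sii_doublet", len(groups_line_nums)+1)
--             component_list.append(groups_line_nums["sii_doublet"])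
--         elif line in neiii_doublet:
--             groups_line_nums.setdefault("neiii_doublet", len(groups_line_nums)+1)
--             component_list.append(groups_line_nums["neiii_doublet"])
--         elif line in other_lines:
--             groups_line_nums.setdefault("other_lines", len(groups_line_nums)+1)
--             component_list.append(groups_line_nums["other_lines"])
--         else:
--             raise ValueError(f"Unknown emission line: {line}")
--
--     max_component = max(component_list) if component_list else 0
--
--     return component_list, max_component
-- ===== SOURCE B (Python) =====
-- def assign_gas_components(gas_names):
--     groups = {
--         'narrow_balmer': ['H10', 'H9', 'H8', 'Heps', 'Hdelta', 'Hgamma', 'Hbeta', 'Halpha'],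
--         'oii_doublet': ['[OII]3726', '[OII]3729'],
--         'sii_doublet': ['[SII]6716', '[SII]6731'],
--         'neiii_doublet': ['[NeIII]3968', '[NeIII]3869'],
--         'other_lines': ['HeII4687', 'HeI5876', '[OIII]5007_d', '[OI]6300_d', '[NII]6583_d'],
--     }
--     # stage 1: classify every line into its group key (nested scan over the grouping dict)
--     keys = []
--     for line in gas_names:
--         for gname, members in groups.items():
--             if line in members:
--                 keys.append(gname)
--                 break
--         else:
--             raise ValueError(f"Unknown emission line: {line}")
--     # stage 2: rank the distinct group keys by the position of their earliest occurrence
--     order = sorted(set(keys), key=keys.index)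
--     # stage 3: each line's component is the rank of its group; the count of groups is the max
--     return [order.index(g) + 1 for g in keys], len(order)
-- ===== Notes on version B (the rewrite author's own statement) =====
-- stated objective: alternative
-- what changed: Instead of A's single pass that assigns the next counter value the first time a group is seen (if/elif cascade plus a setdefault dict and a final max()), B works in stages: classify every line into its group key by scanning the grouping dict, then rank the distinct group keys by sorting them on the position of their earliest occurrence (sorted(set(keys), key=keys.index)), and read each component as that rank and max_component as the number of distinct groups.
import Mathlib
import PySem

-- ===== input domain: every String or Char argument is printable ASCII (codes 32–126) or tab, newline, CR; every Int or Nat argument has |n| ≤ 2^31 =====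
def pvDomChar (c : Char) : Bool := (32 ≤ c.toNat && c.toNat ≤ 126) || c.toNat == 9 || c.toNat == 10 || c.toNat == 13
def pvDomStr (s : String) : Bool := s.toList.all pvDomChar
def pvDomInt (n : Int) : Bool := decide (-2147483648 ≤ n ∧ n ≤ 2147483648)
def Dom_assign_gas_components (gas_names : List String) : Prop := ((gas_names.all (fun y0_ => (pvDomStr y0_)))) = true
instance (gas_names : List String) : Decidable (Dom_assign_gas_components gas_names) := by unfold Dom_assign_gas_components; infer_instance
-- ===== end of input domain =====

-- B replaces A's single-pass counter-dict numbering with a staged computation: classify each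
-- line into its group key, rank the distinct keys by sorting them on their earliest occurrence,
-- and read components off that ranking — an alternative of similar cost; the equivalence is
-- about the return value (neither version mutates its argument).

-- ===== PORT A =====
def pvNarrowBalmer : List String := ["H10", "H9", "H8", "Heps", "Hdelta", "Hgamma", "Hbeta", "Halpha"]
def pvOiiDoublet : List String := ["[OII]3726", "[OII]3729"]
def pvSiiDoublet : List String := ["[SII]6716", "[SII]6731"]
def pvNeiiiDoublet : List String := ["[NeIII]3968", "[NeIII]3869"]
def pvOtherLines : List String := ["HeII4687", "HeI5876", "[OIII]5007_d", "[OI]6300_d", "[NII]6583_d"]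

-- A's for-loop: component_list accumulator + the groups_line_nums dict; `none` = the ValueError branch.
-- d.getD g 0 ports d["g"]: after setdefault the key is always present, so the 0 default is never taken.
def agcLoop : List String → List Int → PySem.Dict String Int → Option (List Int)
  | [], acc, _ => some acc
  | line :: rest, acc, d =>
    if line ∈ pvNarrowBalmer then
      let d' := d.setdefault "narrow_balmer" ((d.size : Int) + 1)
      agcLoop rest (acc ++ [d'.getD "narrow_balmer" 0]) d'
    else if line ∈ pvOiiDoublet then
      let d' := d.setdefault "oii_doublet" ((d.size : Int) + 1)
      agcLoop rest (acc ++ [d'.getD "oii_doublet" 0]) d'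
    else if line ∈ pvSiiDoublet then
      let d' := d.setdefault "sii_doublet" ((d.size : Int) + 1)
      agcLoop rest (acc ++ [d'.getD "sii_doublet" 0]) d'
    else if line ∈ pvNeiiiDoublet then
      let d' := d.setdefault "neiii_doublet" ((d.size : Int) + 1)
      agcLoop rest (acc ++ [d'.getD "neiii_doublet" 0]) d'
    else if line ∈ pvOtherLines then
      let d' := d.setdefault "other_lines" ((d.size : Int) + 1)
      agcLoop rest (acc ++ [d'.getD "other_lines" 0]) d'
    else none

def assign_gas_components (gas_names : List String) : List Int × Int :=
  match agcLoop gas_names [] PySem.Dict.empty with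
  | none => ([], 0)  -- ValueError: unreachable under Pre_
  | some cl => (cl, if cl = [] then 0 else (PySem.List.max? cl (fun y => y)).getD 0)

-- ===== PORT B =====
-- the grouping dict, iterated in insertion order by the inner for-loop
def pvGroups : List (String × List String) :=
  [("narrow_balmer", ["H10", "H9", "H8", "Heps", "Hdelta", "Hgamma", "Hbeta", "Halpha"]),
   ("oii_doublet", ["[OII]3726", "[OII]3729"]),
   ("sii_doublet", ["[SII]6716", "[SII]6731"]),
   ("neiii_doublet", ["[NeIII]3968", "[NeIII]3869"]),
   ("other_lines", ["HeII4687", "HeI5876", "[OIII]5007_d", "[OI]6300_d", "[NII]6583_d"])]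

-- B's inner for-else over groups.items(): first group containing the line; none = the ValueError
def classifyLoop : List (String × List String) → String → Option String
  | [], _ => none
  | (gname, members) :: rest, line =>
    if line ∈ members then some gname else classifyLoop rest line

-- B's outer loop building `keys`; none = a line hit the for-else raise
def keysLoop : List String → List String → Option (List String)
  | [], acc => some acc
  | line :: rest, acc =>
    match classifyLoop pvGroups line with
    | some g => keysLoop rest (acc ++ [g])
    | none => none

-- `.index` on members of the list is always found, so the `.getD 0` default is never taken
def assign_gas_components_alt (gas_names : List String) : List Int × Int :=
  match keysLoop gas_names [] with
  | none => ([], 0)  -- ValueError: unreachable under Pre_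
  | some keys =>
    let order := PySem.List.sorted (PySem.Set.ofList keys)
        (fun g => (PySem.List.index? keys g).getD 0) false  -- sorted(set(keys), key=keys.index)
    (keys.map (fun g => (((PySem.List.index? order g).getD 0 : Nat) : Int) + 1),
     (order.length : Int))

-- ===== PRECONDITION & SPEC =====
-- Pre_ excludes inputs containing an unknown line name, on which A raises ValueError (B raises too).
def Pre_assign_gas_components (gas_names : List String) : Prop :=
  ∀ line ∈ gas_names,
    line ∈ (["H10", "H9", "H8", "Heps", "Hdelta", "Hgamma", "Hbeta", "Halpha",
             "[OII]3726", "[OII]3729", "[SII]6716", "[SII]6731",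
             "[NeIII]3968", "[NeIII]3869",
             "HeII4687", "HeI5876", "[OIII]5007_d", "[OI]6300_d", "[NII]6583_d"] : List String)
instance (gas_names : List String) : Decidable (Pre_assign_gas_components gas_names) := by
  unfold Pre_assign_gas_components; infer_instance

def pvWitness_assign_gas_components : List String :=
  ["Halpha", "[OIII]5007_d", "Hbeta", "HeI5876", "[OII]3726"]

def Spec_assign_gas_components (gas_names : List String) (out : List Int × Int) : Prop := out = assign_gas_components_alt gas_names
instance (gas_names : List String) (out : List Int × Int) : Decidable (Spec_assign_gas_components gas_names out) := by unfold Spec_assign_gas_components; infer_instance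

-- ===== CLAIM (what is proved, stated in full; the proofs are below) =====
def Claim_equal_assign_gas_components : Prop := ∀ (gas_names : List String), Dom_assign_gas_components gas_names → Pre_assign_gas_components gas_names → Spec_assign_gas_components gas_names (assign_gas_components gas_names)

-- ===== LEMMAS AND PROOFS =====

-- the total name→group function both sides are reduced to
def pvGroupOf (line : String) : String := (classifyLoop pvGroups line).getD ""

-- value stored for a group key that sits at position i of the first-appearance list
def pvVal (o : Option Nat) : Option Int := o.map (fun i : Nat => (i : Int) + 1)

-- A's reference recursion: components assigned by first appearance, starting from `seen`
def compsA : List String → List String → List Int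
  | _, [] => []
  | seen, g :: gs =>
      ((((PySem.List.index? (PySem.Set.add seen g) g).getD 0 : Nat) : Int) + 1)
        :: compsA (PySem.Set.add seen g) gs

lemma index?_append_singleton_of_ne {k g : String} (s : List String) (h : k ≠ g) :
    PySem.List.index? (s ++ [g]) k = PySem.List.index? s k := by
  induction s with
  | nil => simp [PySem.List.index?_eq_idxOf?, List.idxOf?, List.findIdx?_cons, Ne.symm h]
  | cons a t ih =>
    by_cases ha : a = k
    · subst ha; rw [List.cons_append, PySem.List.index?_cons_self, PySem.List.index?_cons_self]
    · rw [List.cons_append, PySem.List.index?_cons_of_ne _ ha, PySem.List.index?_cons_of_ne _ ha, ih]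

lemma set_add_of_mem {g : String} {seen : List String} (h : g ∈ seen) :
    PySem.Set.add seen g = seen := by
  unfold PySem.Set.add PySem.Set.contains
  rw [if_pos (List.contains_iff_mem.mpr h)]

lemma set_add_of_not_mem {g : String} {seen : List String} (h : g ∉ seen) :
    PySem.Set.add seen g = seen ++ [g] := by
  unfold PySem.Set.add PySem.Set.contains
  rw [if_neg (fun hc => h (List.contains_iff_mem.mp hc))]

lemma setdefault_inv (d : PySem.Dict String Int) (seen : List String) (g : String)
    (hget : ∀ k, d.get? k = pvVal (PySem.List.index? seen k))
    (hsize : d.size = seen.length) :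
    (∀ k, (d.setdefault g ((d.size : Int) + 1)).get? k
        = pvVal (PySem.List.index? (PySem.Set.add seen g) k)) ∧
    (d.setdefault g ((d.size : Int) + 1)).size = (PySem.Set.add seen g).length ∧
    (d.setdefault g ((d.size : Int) + 1)).getD g 0
        = (((PySem.List.index? (PySem.Set.add seen g) g).getD 0 : Nat) : Int) + 1 := by
  have hsome : (PySem.List.index? seen g).isSome = decide (g ∈ seen) := by
    by_cases hmem : g ∈ seen
    · rw [(PySem.List.index?_isSome_iff seen g).mpr hmem]
      simp [hmem]
    · rw [(PySem.List.index?_eq_none_iff seen g).mpr hmem]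
      simp [hmem]
  have hcont : d.contains g = decide (g ∈ seen) := by
    rw [PySem.Dict.contains_eq_isSome_get?, hget g, ← hsome]
    simp [pvVal]
  by_cases h : g ∈ seen
  · have hadd : PySem.Set.add seen g = seen := set_add_of_mem h
    have hd' : d.setdefault g ((d.size : Int) + 1) = d :=
      PySem.Dict.setdefault_of_contains _ _ (by rw [hcont]; simpa using h)
    obtain ⟨i, hi⟩ := Option.isSome_iff_exists.mp ((PySem.List.index?_isSome_iff seen g).mpr h)
    refine ⟨fun k => by rw [hd', hadd]; exact hget k, by rw [hd', hadd, hsize], ?_⟩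
    rw [hd', hadd, PySem.Dict.getD_eq_get?_getD, hget g, hi]
    simp [pvVal]
  · have hadd : PySem.Set.add seen g = seen ++ [g] := set_add_of_not_mem h
    have hd' : d.setdefault g ((d.size : Int) + 1) = d.insert g ((d.size : Int) + 1) :=
      PySem.Dict.setdefault_of_not_contains _ _ (by rw [hcont]; simpa using h)
    have hidx_self : PySem.List.index? (seen ++ [g]) g = some seen.length :=
      PySem.List.index?_append_singleton_self seen g h
    refine ⟨?_, ?_, ?_⟩
    · intro k
      rw [hd', PySem.Dict.get?_insert, hadd]
      by_cases hk : k = g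
      · subst hk
        rw [if_pos rfl, hidx_self]
        simp [pvVal, hsize]
      · rw [if_neg hk, index?_append_singleton_of_ne seen hk]
        exact hget k
    · rw [hd', PySem.Dict.size_insert, hcont, hadd]
      simp [h, hsize]
    · rw [hd', PySem.Dict.getD_eq_get?_getD, PySem.Dict.get?_insert, hadd, hidx_self]
      simp [hsize]

-- branch facts, all decided on the literal lists
lemma branch_nb : ∀ l ∈ pvNarrowBalmer, pvGroupOf l = "narrow_balmer" := by decide
lemma branch_oii : ∀ l ∈ pvOiiDoublet, l ∉ pvNarrowBalmer ∧ pvGroupOf l = "oii_doublet" := by decide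
lemma branch_sii : ∀ l ∈ pvSiiDoublet, l ∉ pvNarrowBalmer ∧ l ∉ pvOiiDoublet ∧ pvGroupOf l = "sii_doublet" := by decide
lemma branch_neiii : ∀ l ∈ pvNeiiiDoublet, l ∉ pvNarrowBalmer ∧ l ∉ pvOiiDoublet ∧ l ∉ pvSiiDoublet ∧ pvGroupOf l = "neiii_doublet" := by decide
lemma branch_other : ∀ l ∈ pvOtherLines, l ∉ pvNarrowBalmer ∧ l ∉ pvOiiDoublet ∧ l ∉ pvSiiDoublet ∧ l ∉ pvNeiiiDoublet ∧ pvGroupOf l = "other_lines" := by decide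
lemma known_cases : ∀ l ∈ (["H10", "H9", "H8", "Heps", "Hdelta", "Hgamma", "Hbeta", "Halpha",
             "[OII]3726", "[OII]3729", "[SII]6716", "[SII]6731",
             "[NeIII]3968", "[NeIII]3869",
             "HeII4687", "HeI5876", "[OIII]5007_d", "[OI]6300_d", "[NII]6583_d"] : List String),
    l ∈ pvNarrowBalmer ∨ l ∈ pvOiiDoublet ∨ l ∈ pvSiiDoublet ∨ l ∈ pvNeiiiDoublet ∨ l ∈ pvOtherLines := by decide
lemma classify_known : ∀ l ∈ (["H10", "H9", "H8", "Heps", "Hdelta", "Hgamma", "Hbeta", "Halpha",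
             "[OII]3726", "[OII]3729", "[SII]6716", "[SII]6731",
             "[NeIII]3968", "[NeIII]3869",
             "HeII4687", "HeI5876", "[OIII]5007_d", "[OI]6300_d", "[NII]6583_d"] : List String),
    classifyLoop pvGroups l = some (pvGroupOf l) := by decide

lemma agcLoop_eq (names : List String) : ∀ (acc : List Int) (seen : List String) (d : PySem.Dict String Int),
    Pre_assign_gas_components names →
    (∀ k, d.get? k = pvVal (PySem.List.index? seen k)) →
    d.size = seen.length →
    agcLoop names acc d = some (acc ++ compsA seen (names.map pvGroupOf)) := by
  induction names with
  | nil => intro acc seen d _ _ _; simp [agcLoop, compsA]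
  | cons line rest ih =>
    intro acc seen d hpre hget hsize
    have hknown := hpre line (List.mem_cons_self ..)
    have hrest : Pre_assign_gas_components rest := fun l hl => hpre l (List.mem_cons_of_mem _ hl)
    rcases known_cases line hknown with h | h | h | h | h
    · have hg := branch_nb line h
      obtain ⟨h1, h2, h3⟩ := setdefault_inv d seen "narrow_balmer" hget hsize
      rw [agcLoop, if_pos h, ih _ _ _ hrest h1 h2]
      simp [compsA, hg, h3]
    · obtain ⟨hn1, hg⟩ := branch_oii line h
      obtain ⟨h1, h2, h3⟩ := setdefault_inv d seen "oii_doublet" hget hsize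
      rw [agcLoop, if_neg hn1, if_pos h, ih _ _ _ hrest h1 h2]
      simp [compsA, hg, h3]
    · obtain ⟨hn1, hn2, hg⟩ := branch_sii line h
      obtain ⟨h1, h2, h3⟩ := setdefault_inv d seen "sii_doublet" hget hsize
      rw [agcLoop, if_neg hn1, if_neg hn2, if_pos h, ih _ _ _ hrest h1 h2]
      simp [compsA, hg, h3]
    · obtain ⟨hn1, hn2, hn3, hg⟩ := branch_neiii line h
      obtain ⟨h1, h2, h3⟩ := setdefault_inv d seen "neiii_doublet" hget hsize
      rw [agcLoop, if_neg hn1, if_neg hn2, if_neg hn3, if_pos h, ih _ _ _ hrest h1 h2]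
      simp [compsA, hg, h3]
    · obtain ⟨hn1, hn2, hn3, hn4, hg⟩ := branch_other line h
      obtain ⟨h1, h2, h3⟩ := setdefault_inv d seen "other_lines" hget hsize
      rw [agcLoop, if_neg hn1, if_neg hn2, if_neg hn3, if_neg hn4, if_pos h, ih _ _ _ hrest h1 h2]
      simp [compsA, hg, h3]

lemma update_exists_append (gs : List String) : ∀ seen : List String,
    ∃ t, PySem.Set.update seen gs = seen ++ t := by
  induction gs with
  | nil => intro seen; exact ⟨[], by simp [PySem.Set.update]⟩
  | cons g gs ih =>
    intro seen
    have hupd : PySem.Set.update seen (g :: gs) = PySem.Set.update (PySem.Set.add seen g) gs := by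
      simp [PySem.Set.update]
    rw [hupd]
    by_cases h : g ∈ seen
    · obtain ⟨t, ht⟩ := ih seen
      exact ⟨t, by rw [set_add_of_mem h]; exact ht⟩
    · obtain ⟨t, ht⟩ := ih (seen ++ [g])
      refine ⟨g :: t, ?_⟩
      rw [set_add_of_not_mem h, ht, List.append_assoc]
      rfl

lemma compsA_eq (gs : List String) : ∀ seen : List String,
    compsA seen gs = gs.map (fun g =>
      (((PySem.List.index? (PySem.Set.update seen gs) g).getD 0 : Nat) : Int) + 1) := by
  induction gs with
  | nil => intro seen; simp [compsA]
  | cons g gs ih =>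
    intro seen
    have hupd : PySem.Set.update seen (g :: gs) = PySem.Set.update (PySem.Set.add seen g) gs := by
      simp [PySem.Set.update]
    obtain ⟨t, ht⟩ := update_exists_append gs (PySem.Set.add seen g)
    have hmem : g ∈ PySem.Set.add seen g := (PySem.Set.mem_add seen g g).mpr (Or.inr rfl)
    rw [compsA, ih (PySem.Set.add seen g), hupd, ht]
    simp only [List.map_cons]
    rw [PySem.List.index?_append_of_mem t hmem]

lemma keysLoop_eq (names : List String) : ∀ acc : List String,
    Pre_assign_gas_components names →
    keysLoop names acc = some (acc ++ names.map pvGroupOf) := by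
  induction names with
  | nil => intro acc _; simp [keysLoop]
  | cons line rest ih =>
    intro acc hpre
    have h1 := classify_known line (hpre line (List.mem_cons_self ..))
    have h2 := ih (acc ++ [pvGroupOf line]) (fun l hl => hpre l (List.mem_cons_of_mem _ hl))
    rw [keysLoop, h1]
    simpa using h2

-- the first-appearance list is strictly increasing under the first-occurrence key,
-- so sorting the set by that key returns it unchanged
lemma ofList_pairwise_index (keys : List String) :
    (PySem.Set.ofList keys).Pairwise
      (fun a b => (PySem.List.index? keys a).getD 0 < (PySem.List.index? keys b).getD 0) := by
  induction keys using List.reverseRecOn with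
  | nil => simp [PySem.Set.ofList]
  | append_singleton l x ih =>
    have hof : PySem.Set.ofList (l ++ [x]) = PySem.Set.add (PySem.Set.ofList l) x := by
      rw [PySem.Set.ofList_eq_foldl, PySem.Set.ofList_eq_foldl, List.foldl_append]
      rfl
    have hmem_of : ∀ a, a ∈ PySem.Set.ofList l ↔ a ∈ l := fun a => PySem.Set.mem_ofList l a
    have hkey_keep : ∀ a ∈ PySem.Set.ofList l,
        PySem.List.index? (l ++ [x]) a = PySem.List.index? l a := by
      intro a ha
      exact PySem.List.index?_append_of_mem [x] ((hmem_of a).mp ha)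
    by_cases hx : x ∈ PySem.Set.ofList l
    · rw [hof, set_add_of_mem hx]
      refine List.Pairwise.imp_of_mem ?_ ih
      intro a b ha hb hlt
      rw [hkey_keep a ha, hkey_keep b hb]
      exact hlt
    · have hxl : x ∉ l := fun h => hx ((hmem_of x).mpr h)
      rw [hof, set_add_of_not_mem hx, List.pairwise_append]
      refine ⟨?_, List.pairwise_singleton _ _, ?_⟩
      · refine List.Pairwise.imp_of_mem ?_ ih
        intro a b ha hb hlt
        rw [hkey_keep a ha, hkey_keep b hb]
        exact hlt
      · intro a ha b hb
        rw [List.mem_singleton] at hb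
        subst hb
        rw [hkey_keep a ha, PySem.List.index?_append_singleton_self l b hxl]
        obtain ⟨i, hi⟩ := Option.isSome_iff_exists.mp
          ((PySem.List.index?_isSome_iff l a).mpr ((hmem_of a).mp ha))
        obtain ⟨hlt, -, -⟩ := PySem.List.getElem_of_index?_eq_some hi
        rw [hi]
        simpa using hlt
lemma order_eq_dedup (keys : List String) :
    PySem.List.sorted (PySem.Set.ofList keys)
      (fun g => (PySem.List.index? keys g).getD 0) false = PySem.List.dedup keys := by
  rw [PySem.List.sorted_eq_of_perm_of_pairwise_lt _ _ _ (List.Perm.refl _) (ofList_pairwise_index keys)]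
  rw [PySem.List.dedup_eq_ofList]

lemma dedup_eq_update_nil (gs : List String) : PySem.List.dedup gs = PySem.Set.update [] gs := by
  simp [PySem.List.dedup, PySem.Set.ofList_eq_foldl, PySem.Set.update]

lemma max_of_comps (keys : List String) (h : keys ≠ []) :
    (PySem.List.max? (keys.map (fun k =>
        (((PySem.List.index? (PySem.List.dedup keys) k).getD 0 : Nat) : Int) + 1)) (fun y => y)).getD 0
      = ((PySem.List.dedup keys).length : Int) := by
  set order := PySem.List.dedup keys with horder
  set cl := keys.map (fun k => (((PySem.List.index? order k).getD 0 : Nat) : Int) + 1) with hcl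
  have hnodup : order.Nodup := by rw [horder]; exact PySem.List.nodup_dedup keys
  have hsup : ∀ x ∈ keys, x ∈ order := fun x hx => by
    rw [horder]; exact (PySem.List.mem_dedup _ _).mpr hx
  have hsub : ∀ x ∈ order, x ∈ keys := fun x hx => by
    rw [horder] at hx; exact (PySem.List.mem_dedup _ _).mp hx
  have horder_ne : order ≠ [] := by
    obtain ⟨x, hx⟩ := List.exists_mem_of_ne_nil keys h
    intro hemp
    have := hsup x hx
    simp [hemp] at this
  have hpos : 0 < order.length := List.length_pos_iff.mpr horder_ne
  have hle : ∀ c ∈ cl, c ≤ (order.length : Int) := by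
    intro c hc
    rw [hcl] at hc
    obtain ⟨k, hk, rfl⟩ := List.mem_map.mp hc
    have hkd : k ∈ order := hsup k hk
    obtain ⟨i, hi⟩ := Option.isSome_iff_exists.mp ((PySem.List.index?_isSome_iff _ _).mpr hkd)
    obtain ⟨hlt, -, -⟩ := PySem.List.getElem_of_index?_eq_some hi
    rw [hi]; simp; omega
  have hlast : order.length - 1 < order.length := by omega
  have hidx : PySem.List.index? order order[order.length - 1] = some (order.length - 1) := by
    rw [PySem.List.index?_eq_idxOf?, List.idxOf?_eq_some_iff]
    refine ⟨hlast, rfl, ?_⟩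
    intro j hj hje
    have := (List.Nodup.getElem_inj_iff hnodup).mp hje
    omega
  have hmemL : ((order.length : Int)) ∈ cl := by
    have hgk : order[order.length - 1] ∈ keys :=
      hsub _ (List.getElem_mem hlast)
    rw [hcl]
    refine List.mem_map.mpr ⟨order[order.length - 1], hgk, ?_⟩
    rw [hidx]; simp; omega
  obtain ⟨c, t, hct⟩ : ∃ c t, cl = c :: t := by
    rw [hcl]
    cases keys with
    | nil => exact absurd rfl h
    | cons a b => exact ⟨_, _, rfl⟩
  rw [hct, PySem.List.max?_id_cons]
  obtain ⟨hc_le, ht_le⟩ := PySem.List.le_foldl_max t c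
  have hM_mem : t.foldl max c ∈ cl := by
    rcases PySem.List.foldl_max_mem t c with hM | hM
    · rw [hct, hM]; exact List.mem_cons_self ..
    · rw [hct]; exact List.mem_cons_of_mem _ hM
  have h1 : t.foldl max c ≤ (order.length : Int) := hle _ hM_mem
  have h2 : (order.length : Int) ≤ t.foldl max c := by
    rw [hct] at hmemL
    rcases List.mem_cons.mp hmemL with hh | hh
    · rw [← hh] at hc_le ⊢; exact hc_le
    · exact ht_le _ hh
  simp [le_antisymm h1 h2]

-- ===== VERDICT (by name: the statement is the Claim_ definition above) =====
theorem assign_gas_components_spec : Claim_equal_assign_gas_components := by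
  intro gas_names _ hpre
  unfold Spec_assign_gas_components assign_gas_components assign_gas_components_alt
  have hloop := agcLoop_eq gas_names [] [] PySem.Dict.empty hpre
    (by intro k; simp [pvVal, PySem.Dict.get?_empty, PySem.List.index?_eq_idxOf?])
    (by simp [PySem.Dict.size_empty])
  rw [hloop, keysLoop_eq gas_names [] hpre]
  simp only [List.nil_append, order_eq_dedup]
  have hcomp : compsA [] (gas_names.map pvGroupOf)
      = (gas_names.map pvGroupOf).map (fun g =>
          (((PySem.List.index? (PySem.List.dedup (gas_names.map pvGroupOf)) g).getD 0 : Nat) : Int) + 1) := by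
    rw [compsA_eq, dedup_eq_update_nil]
  simp only [hcomp]
  by_cases hnil : gas_names.map pvGroupOf = []
  · simp [hnil, PySem.List.dedup, PySem.Set.ofList]
  · have hcl_ne : (gas_names.map pvGroupOf).map (fun g =>
        (((PySem.List.index? (PySem.List.dedup (gas_names.map pvGroupOf)) g).getD 0 : Nat) : Int) + 1) ≠ [] := by
      simpa using hnil
    rw [if_neg hcl_ne, max_of_comps _ hnil]
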